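-- pv_equiv track=rewrite | github.com/drawnator/olimpiadas_2022 | codeforces round 836/c836.py | fbb
-- ===== SOURCE A (Python) =====
-- def fbb(a,n):
--     p1 = 0
--     p2 = len(a)-1
--     while p1 != p2:
--         mid = (p1+p2)//2
--         if a[mid][0] >= n: p2 = mid
--         else: p1 = mid+1
--     return p1
-- ===== SOURCE B (Python) =====
-- def fbb(a, n):
--     # Divide and conquer on list slices: search in a[:-1] (A's last element is
--     # never probed), returning a relative index summed back up the recursion.
--     def go(seg):
--         if not seg:
--             return 0
--         m = len(seg) // 2
--         if seg[m][0] >= n: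
--             return go(seg[:m])
--         return m + 1 + go(seg[m+1:])
--     return go(a[:-1])
-- ===== Notes on version B (the rewrite author's own statement) =====
-- stated objective: alternative
-- what changed: Divide-and-conquer on actual list slices of a[:-1] returning relative indices summed up the recursion, instead of A's iterative while loop over two absolute index pointers (p1, p2); same probe sequence, different structure and state.
-- crash fix: On the empty list A raises IndexError (it probes a[-1]); B's empty-segment base case returns 0 there. — e.g. on fbb([], 0): A raises IndexError, B returns 0
import Mathlib
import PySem

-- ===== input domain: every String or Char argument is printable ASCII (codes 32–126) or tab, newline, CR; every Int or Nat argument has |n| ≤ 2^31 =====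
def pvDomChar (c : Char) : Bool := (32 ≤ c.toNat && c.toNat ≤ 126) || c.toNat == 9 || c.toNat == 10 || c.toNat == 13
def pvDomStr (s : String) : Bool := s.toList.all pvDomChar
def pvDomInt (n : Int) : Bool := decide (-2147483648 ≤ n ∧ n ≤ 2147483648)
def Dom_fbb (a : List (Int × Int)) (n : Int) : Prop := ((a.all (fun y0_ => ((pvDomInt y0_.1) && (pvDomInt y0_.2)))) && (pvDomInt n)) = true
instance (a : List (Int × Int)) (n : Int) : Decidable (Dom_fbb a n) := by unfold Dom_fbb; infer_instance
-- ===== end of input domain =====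

-- B replaces A's iterative (p1,p2) two-pointer while loop by divide-and-conquer on actual
-- list slices of a[:-1], summing relative indices back up; same result, different structure.
-- Pre_ excludes the empty list, on which A raises IndexError; B returns 0 there (Raises_fbb).


-- ===== PORT A =====
-- A's while loop as fuel-indexed tail recursion over the two absolute pointers (p1, p2);
-- fuel a.length suffices (the interval shrinks each iteration). 'none' from pyGet? =
-- Python's IndexError (only reachable on a = [], excluded by Pre_); the value there is arbitrary.
def fbbLoop (a : List (Int × Int)) (n : Int) : Nat → Int → Int → Int
  | 0, p1, _ => p1
  | f + 1, p1, p2 =>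
    if p1 = p2 then p1
    else
      let mid := PySem.Int.floordiv (p1 + p2) 2
      match PySem.List.pyGet? a mid with
      | none => p1
      | some x => if x.1 ≥ n then fbbLoop a n f p1 mid else fbbLoop a n f (mid + 1) p2

def fbb (a : List (Int × Int)) (n : Int) : Int :=
  fbbLoop a n a.length 0 ((a.length : Int) - 1)

-- ===== PORT B =====
-- B's go: divide and conquer on the segment itself (a Python list slice), returning a RELATIVE
-- index summed back up the recursion; fuel a.length bounds the depth (the segment shrinks).
-- seg[m] is always in range (m = len//2 < len for seg ≠ []), so pyGetD's default is unreachable.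
def fbbGo (n : Int) : Nat → List (Int × Int) → Int
  | 0, _ => 0
  | f + 1, seg =>
    if seg = [] then 0
    else
      let m := seg.length / 2
      if (PySem.List.pyGetD seg (m : Int) (0, 0)).1 ≥ n then
        fbbGo n f (PySem.List.slice seg none (some (m : Int)))
      else
        (m : Int) + 1 + fbbGo n f (PySem.List.slice seg (some ((m : Int) + 1)) none)

def fbb_alt (a : List (Int × Int)) (n : Int) : Int :=
  fbbGo n a.length (PySem.List.slice a none (some (-1)))

-- ===== PRECONDITION & SPEC =====
-- Pre_ excludes only the empty list, on which Python A raises IndexError (it probes a[-1]).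
def Pre_fbb (a : List (Int × Int)) (n : Int) : Prop := a ≠ []
instance (a : List (Int × Int)) (n : Int) : Decidable (Pre_fbb a n) := by unfold Pre_fbb; infer_instance
def pvWitness_fbb : (List (Int × Int)) × Int := ([(1, 2), (3, 4)], 2)

-- On the empty list A raises IndexError (it probes a[-1]); B's empty-segment base case returns 0.
def Raises_fbb (a : List (Int × Int)) (n : Int) : Prop := a = []
instance (a : List (Int × Int)) (n : Int) : Decidable (Raises_fbb a n) := by unfold Raises_fbb; infer_instance
def pvRaiseWitness_fbb : (List (Int × Int)) × Int := ([], 0)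
def pvRaiseWitnessOut_fbb : Int := 0

def Spec_fbb (a : List (Int × Int)) (n : Int) (out : Int) : Prop := out = fbb_alt a n
instance (a : List (Int × Int)) (n : Int) (out : Int) : Decidable (Spec_fbb a n out) := by unfold Spec_fbb; infer_instance

-- ===== CLAIM (what is proved, stated in full; the proofs are below) =====
def Claim_equal_fbb : Prop := ∀ (a : List (Int × Int)) (n : Int), Dom_fbb a n → Pre_fbb a n → Spec_fbb a n (fbb a n)
def Claim_raises_fbb : Prop := (∀ (a : List (Int × Int)) (n : Int), Dom_fbb a n → Raises_fbb a n → ¬ Pre_fbb a n) ∧ (Dom_fbb (pvRaiseWitness_fbb.1) (pvRaiseWitness_fbb.2) ∧ Raises_fbb (pvRaiseWitness_fbb.1) (pvRaiseWitness_fbb.2) ∧ fbb_alt (pvRaiseWitness_fbb.1) (pvRaiseWitness_fbb.2) = pvRaiseWitnessOut_fbb)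

-- ===== LEMMAS AND PROOFS =====
-- Simulation: A's loop on an absolute interval [p1, p2] equals p1 + B's recursion on the
-- actual segment (a.drop p1).take (p2 - p1), provided the interval is inside the list.
lemma loop_eq_go (a : List (Int × Int)) (n : Int) :
    ∀ (f p1 p2 : Nat), p1 ≤ p2 → p2 ≤ a.length → p2 - p1 ≤ f →
      fbbLoop a n f (p1 : Int) (p2 : Int) = (p1 : Int) + fbbGo n f ((a.drop p1).take (p2 - p1)) := by
  intro f
  induction f with
  | zero =>
    intro p1 p2 h12 _ hf
    have : p1 = p2 := by omega
    subst this
    simp [fbbLoop, fbbGo]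
  | succ f ih =>
    intro p1 p2 h12 hlen hf
    by_cases h : p1 = p2
    · subst h; simp [fbbLoop, fbbGo]
    · have hlt : p1 < p2 := by omega
      have hmid : PySem.Int.floordiv ((p1 : Int) + (p2 : Int)) 2 = (((p1 + p2) / 2 : Nat) : Int) := by
        rw [PySem.Int.floordiv_eq_ediv_of_pos (by omega)]
        omega
      obtain ⟨M, hM⟩ : ∃ M, M = (p1 + p2) / 2 := ⟨_, rfl⟩
      have hMlo : p1 ≤ M := by omega
      have hMhi : M < p2 := by omega
      have hMrange : M < a.length := by omega
      obtain ⟨seg, hseg⟩ : ∃ seg, seg = (a.drop p1).take (p2 - p1) := ⟨_, rfl⟩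
      have hseglen : seg.length = p2 - p1 := by
        simp [hseg, List.length_take, List.length_drop]; omega
      have hsegne : seg ≠ [] := by
        intro hnil; rw [hnil] at hseglen; simp at hseglen; omega
      have hm : seg.length / 2 = M - p1 := by omega
      -- both sides probe the same element a[M]
      have hprobe : seg[M - p1]? = some a[M] := by
        rw [hseg, List.getElem?_take_of_lt (by omega), List.getElem?_drop,
            show p1 + (M - p1) = M by omega]
        simp [List.getElem?_eq_getElem hMrange]
      have hget : PySem.List.pyGet? a ((M : Nat) : Int) = some a[M] := by
        rw [PySem.List.pyGet?_natCast]; simp [List.getElem?_eq_getElem hMrange]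
      have hgetD : PySem.List.pyGetD seg ((seg.length / 2 : Nat) : Int) (0, 0) = a[M] := by
        rw [PySem.List.pyGetD_natCast, hm, List.getD_eq_getElem?_getD, hprobe]; rfl
      -- one step of A's loop
      have hloop : fbbLoop a n (f + 1) (p1 : Int) (p2 : Int)
          = if a[M].1 ≥ n then fbbLoop a n f (p1 : Int) ((M : Nat) : Int)
            else fbbLoop a n f (((M : Nat) : Int) + 1) (p2 : Int) := by
        rw [fbbLoop]
        simp only [if_neg (show ((p1 : Int) ≠ (p2 : Int)) by exact_mod_cast h)]
        rw [hmid, ← hM, hget]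
      -- one step of B's recursion
      rw [← hseg, hloop, fbbGo]
      simp only [hsegne, if_false, hgetD]
      rw [hm]
      by_cases hx : a[M].1 ≥ n
      · simp only [hx, if_pos]
        rw [ih p1 M hMlo (by omega) (by omega)]
        congr 2
        rw [PySem.List.slice_to_natCast, hseg, List.take_take]
        congr 1; omega
      · simp only [hx, if_neg, not_false_iff]
        rw [show ((M : Nat) : Int) + 1 = (((M + 1 : Nat)) : Int) by push_cast; ring,
            ih (M + 1) p2 (by omega) hlen (by omega)]
        have hslice : PySem.List.slice seg (some (((M - p1 : Nat) : Int) + 1)) none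
            = (a.drop (M + 1)).take (p2 - (M + 1)) := by
          rw [show ((M - p1 : Nat) : Int) + 1 = (((M - p1 + 1 : Nat)) : Int) by push_cast; ring,
              PySem.List.slice_from_natCast, hseg, List.drop_take, List.drop_drop]
          congr 1
          · omega
          · congr 1
            omega
        rw [hslice]
        generalize fbbGo n f ((a.drop (M + 1)).take (p2 - (M + 1))) = G
        omega

-- ===== VERDICT (by name: the statement is the Claim_ definition above) =====
theorem fbb_spec : Claim_equal_fbb := by
  intro a n _ hpre
  unfold Spec_fbb fbb fbb_alt
  have hlen : 1 ≤ a.length := by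
    cases a with
    | nil => exact absurd rfl hpre
    | cons x xs => simp
  rw [show ((a.length : Int) - 1) = (((a.length - 1 : Nat)) : Int) by omega,
      show ((0 : Int)) = ((0 : Nat) : Int) from rfl,
      loop_eq_go a n a.length 0 (a.length - 1) (by omega) (by omega) (by omega)]
  rw [PySem.List.slice_to_neg_one, List.dropLast_eq_take]
  simp

@[simp] theorem fbb_raises : Claim_raises_fbb := by
  unfold Claim_raises_fbb
  exact ⟨fun a n _ h => by simp [Raises_fbb, Pre_fbb] at h ⊢; exact h, by decide⟩
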